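-- pv_equiv track=rewrite | github.com/hcfun/MetalEP | data/data_sampling.py | reidx_eval
-- ===== SOURCE A (Python) =====
-- from collections import defaultdict as ddict
--
-- def reidx_eval(triples, train_ent_reidx, train_rel_reidx, train_time_reidx):
--
--     ent_reidx = dict()
--     rel_reidx = dict()
--     time_reidx = dict()
--
--     entidx = 0
--     relidx = 0
--     timeidx = 0
--
--     ent_freq = ddict(int)
--     rel_freq = ddict(int)
--     time_freq = ddict(int)
--
--     reidx_triples = []
--     for tri in triples:
--         h, r, t, T = tri
--         if h not in ent_reidx.keys():
--             ent_reidx[h] = entidx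
--             entidx += 1
--         if t not in ent_reidx.keys():
--             ent_reidx[t] = entidx
--             entidx += 1
--         if r not in rel_reidx.keys():
--             rel_reidx[r] = relidx
--             relidx += 1
--         if T not in time_reidx.keys():
--             time_reidx[T] = timeidx
--             timeidx += 1
--
--         ent_freq[ent_reidx[h]] += 1
--         ent_freq[ent_reidx[t]] += 1
--         rel_freq[rel_reidx[r]] += 1
--         time_freq[time_reidx[T]] += 1
--
--         reidx_triples.append((ent_reidx[h], rel_reidx[r], ent_reidx[t], time_reidx[T]))
--
--     #the id mapping(entities and relation in train facts) from new ids to original ones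
--     ent_reidx_inv = {v: k for k, v in ent_reidx.items()}
--     rel_reidx_inv = {v: k for k, v in rel_reidx.items()}
--     time_reidx_inv = {v: k for k, v in time_reidx.items()}
--
--     # mapping the ent ids in valid/test into the ent ids in train (seen entities have a.md mapping and the unseen ones equal to '-1' )
--     ent_map_list = [train_ent_reidx[ent_reidx_inv[i]] if ent_reidx_inv[i] in train_ent_reidx.keys() else -1
--                     for i in range(len(ent_reidx))]
--     # mapping the rel ids in valid/test into the rel ids in train (seen relations have a.md mapping and the unseen ones equal to '-1' )
--     rel_map_list = [train_rel_reidx[rel_reidx_inv[i]] if rel_reidx_inv[i] in train_rel_reidx.keys() else -1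
--                     for i in range(len(rel_reidx))]
--     time_map_list = [train_time_reidx[time_reidx_inv[i]] if time_reidx_inv[i] in train_time_reidx.keys() else -1
--                     for i in range(len(time_reidx))]
--
--     return reidx_triples, ent_freq, rel_freq, time_freq, ent_reidx, rel_reidx, time_reidx, ent_map_list, rel_map_list, time_map_list
-- ===== SOURCE B (Python) =====
-- from collections import defaultdict as ddict
--
-- def reidx_eval(triples, train_ent_reidx, train_rel_reidx, train_time_reidx):
--     # Stage 1: pull out the three key streams in encounter order (head before tail).
--     ents, rels, times = [], [], []
--     for h, r, t, T in triples:
--         ents += (h, t)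
--         rels.append(r)
--         times.append(T)
--
--     # Stage 2: ordered dedup; an element's position in the dedup list IS its new id.
--     ent_uniq = list(dict.fromkeys(ents))
--     rel_uniq = list(dict.fromkeys(rels))
--     time_uniq = list(dict.fromkeys(times))
--     ent_reidx = {k: i for i, k in enumerate(ent_uniq)}
--     rel_reidx = {k: i for i, k in enumerate(rel_uniq)}
--     time_reidx = {k: i for i, k in enumerate(time_uniq)}
--
--     # Stage 3: re-index the triples by table lookup.
--     reidx_triples = [(ent_reidx[h], rel_reidx[r], ent_reidx[t], time_reidx[T])
--                      for h, r, t, T in triples]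
--
--     # Stage 4: positional tally arrays (ids are dense 0..n-1), then load them into
--     # defaultdicts; id order equals first-bump order, so key order matches.
--     ec = [0] * len(ent_uniq)
--     rc = [0] * len(rel_uniq)
--     tc = [0] * len(time_uniq)
--     for h, r, t, T in reidx_triples:
--         ec[h] += 1
--         ec[t] += 1
--         rc[r] += 1
--         tc[T] += 1
--     ent_freq = ddict(int)
--     rel_freq = ddict(int)
--     time_freq = ddict(int)
--     for i, c in enumerate(ec):
--         ent_freq[i] = c
--     for i, c in enumerate(rc):
--         rel_freq[i] = c
--     for i, c in enumerate(tc):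
--         time_freq[i] = c
--
--     # Map lists straight off the dedup lists.
--     ent_map_list = [train_ent_reidx.get(k, -1) for k in ent_uniq]
--     rel_map_list = [train_rel_reidx.get(k, -1) for k in rel_uniq]
--     time_map_list = [train_time_reidx.get(k, -1) for k in time_uniq]
--
--     return (reidx_triples, ent_freq, rel_freq, time_freq, ent_reidx, rel_reidx,
--             time_reidx, ent_map_list, rel_map_list, time_map_list)
-- ===== Notes on version B (the rewrite author's own statement) =====
-- stated objective: alternative
-- what changed: B replaces A's single fused online loop by a staged pipeline: extract the three key streams, ordered-dedup them so an id is just a position, re-index the triples by table lookup, and count frequencies in positional tally arrays (loaded into defaultdicts afterwards) instead of dict tallying; the map lists come straight off the dedup lists, with no inverse dicts or counters.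
import Mathlib
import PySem

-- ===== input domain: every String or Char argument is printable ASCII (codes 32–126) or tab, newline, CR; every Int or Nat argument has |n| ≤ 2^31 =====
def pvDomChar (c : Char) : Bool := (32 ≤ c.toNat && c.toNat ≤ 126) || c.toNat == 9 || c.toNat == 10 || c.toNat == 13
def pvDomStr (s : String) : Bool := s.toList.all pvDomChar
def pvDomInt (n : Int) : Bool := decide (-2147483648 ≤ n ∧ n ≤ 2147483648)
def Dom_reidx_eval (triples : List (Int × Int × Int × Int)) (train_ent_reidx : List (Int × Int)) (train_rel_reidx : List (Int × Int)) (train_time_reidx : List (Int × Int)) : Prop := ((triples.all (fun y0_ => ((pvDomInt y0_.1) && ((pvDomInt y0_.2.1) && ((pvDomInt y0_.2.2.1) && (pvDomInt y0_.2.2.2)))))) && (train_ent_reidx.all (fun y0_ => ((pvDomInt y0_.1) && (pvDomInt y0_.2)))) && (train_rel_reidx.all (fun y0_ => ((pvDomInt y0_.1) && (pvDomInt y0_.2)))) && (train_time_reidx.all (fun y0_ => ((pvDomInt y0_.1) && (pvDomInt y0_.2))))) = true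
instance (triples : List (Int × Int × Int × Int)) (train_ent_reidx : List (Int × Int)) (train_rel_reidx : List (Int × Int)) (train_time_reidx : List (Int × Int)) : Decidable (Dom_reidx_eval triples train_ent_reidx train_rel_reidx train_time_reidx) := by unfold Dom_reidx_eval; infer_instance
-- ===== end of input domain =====

-- B replaces A's fused online loop by a staged pipeline: extract the key streams, ordered-dedup
-- them (an id is a position), re-index by table lookup, and tally into positional count arrays
-- instead of dicts (objective: alternative).

-- ===== PORT A =====
-- A's single loop: id assignment, inline frequency bumps, and the re-indexed triple, all at once.
def reidxLoopA : List (Int × Int × Int × Int) → PySem.Dict Int Int → PySem.Dict Int Int → PySem.Dict Int Int → Int → Int → Int → PySem.Dict Int Int → PySem.Dict Int Int → PySem.Dict Int Int → List (Int × Int × Int × Int) → (PySem.Dict Int Int) × (PySem.Dict Int Int) × (PySem.Dict Int Int) × (PySem.Dict Int Int) × (PySem.Dict Int Int) × (PySem.Dict Int Int) × List (Int × Int × Int × Int)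
  | [], eD, rD, tD, _, _, _, ef, rf, tf, acc => (eD, rD, tD, ef, rf, tf, acc)
  | tri :: rest, eD, rD, tD, ce, cr, ct, ef, rf, tf, acc =>
    let h := tri.1; let r := tri.2.1; let t := tri.2.2.1; let T := tri.2.2.2
    let eD1 := if eD.contains h then eD else eD.insert h ce
    let ce1 := if eD.contains h then ce else ce + 1
    let eD2 := if eD1.contains t then eD1 else eD1.insert t ce1
    let ce2 := if eD1.contains t then ce1 else ce1 + 1
    let rD1 := if rD.contains r then rD else rD.insert r cr
    let cr1 := if rD.contains r then cr else cr + 1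
    let tD1 := if tD.contains T then tD else tD.insert T ct
    let ct1 := if tD.contains T then ct else ct + 1
    -- ent_reidx[h] etc.: the key is present by construction, so getD is exact here
    let hid := eD2.getD h 0
    let tid := eD2.getD t 0
    let rid := rD1.getD r 0
    let Tid := tD1.getD T 0
    let ef1 := (ef.modify hid 0 (· + 1)).modify tid 0 (· + 1)
    let rf1 := rf.modify rid 0 (· + 1)
    let tf1 := tf.modify Tid 0 (· + 1)
    reidxLoopA rest eD2 rD1 tD1 ce2 cr1 ct1 ef1 rf1 tf1 (acc ++ [(hid, rid, tid, Tid)])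

def reidx_eval (triples : List (Int × Int × Int × Int)) (train_ent_reidx : List (Int × Int)) (train_rel_reidx : List (Int × Int)) (train_time_reidx : List (Int × Int)) : (List (Int × Int × Int × Int)) × (List (Int × Int)) × (List (Int × Int)) × (List (Int × Int)) × (List (Int × Int)) × (List (Int × Int)) × (List (Int × Int)) × List Int × List Int × List Int :=
  let s := reidxLoopA triples PySem.Dict.empty PySem.Dict.empty PySem.Dict.empty 0 0 0 PySem.Dict.empty PySem.Dict.empty PySem.Dict.empty []
  let eD := s.1; let rD := s.2.1; let tD := s.2.2.1
  let ef := s.2.2.2.1; let rf := s.2.2.2.2.1; let tf := s.2.2.2.2.2.1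
  let rts := s.2.2.2.2.2.2
  let teD : PySem.Dict Int Int := PySem.Dict.mk train_ent_reidx
  let trD : PySem.Dict Int Int := PySem.Dict.mk train_rel_reidx
  let ttD : PySem.Dict Int Int := PySem.Dict.mk train_time_reidx
  let eInv : PySem.Dict Int Int := PySem.Dict.ofList (eD.items.map (fun p => (p.2, p.1)))
  let rInv : PySem.Dict Int Int := PySem.Dict.ofList (rD.items.map (fun p => (p.2, p.1)))
  let tInv : PySem.Dict Int Int := PySem.Dict.ofList (tD.items.map (fun p => (p.2, p.1)))
  -- ent_reidx_inv[i]: i is always a stored id, so getD is exact here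
  let eml := (PySem.List.pyRange 0 (eD.size : Int) 1).map (fun i =>
    let k := eInv.getD i 0; if teD.contains k then teD.getD k 0 else -1)
  let rml := (PySem.List.pyRange 0 (rD.size : Int) 1).map (fun i =>
    let k := rInv.getD i 0; if trD.contains k then trD.getD k 0 else -1)
  let tml := (PySem.List.pyRange 0 (tD.size : Int) 1).map (fun i =>
    let k := tInv.getD i 0; if ttD.contains k then ttD.getD k 0 else -1)
  (rts, ef.items, rf.items, tf.items, eD.items, rD.items, tD.items, eml, rml, tml)

-- ===== PORT B =====
-- Stage 1: pull the three key streams out of the triples (head before tail).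
def streamsB (triples : List (Int × Int × Int × Int)) : List Int × List Int × List Int :=
  triples.foldl (fun s tri =>
    (s.1 ++ [tri.1, tri.2.2.1], s.2.1 ++ [tri.2.1], s.2.2 ++ [tri.2.2.2])) ([], [], [])

-- {k: i for i, k in enumerate(uniq)}
def idTable (uniq : List Int) : PySem.Dict Int Int :=
  PySem.Dict.ofList ((PySem.List.enumerate uniq 0).map (fun p => (p.2, p.1)))

-- ec[i] += 1 : the ids are dense and in range, so pySetD/pyGetD are exact here
def bumpAt (c : List Int) (i : Int) : List Int :=
  PySem.List.pySetD c i (PySem.List.pyGetD c i 0 + 1)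

-- Stage 4 loop over the re-indexed triples, bumping the three tally arrays.
def tallyArrays (rts : List (Int × Int × Int × Int)) (ec rc tc : List Int) :
    List Int × List Int × List Int :=
  rts.foldl (fun s q =>
    (bumpAt (bumpAt s.1 q.1) q.2.2.1, bumpAt s.2.1 q.2.1, bumpAt s.2.2 q.2.2.2)) (ec, rc, tc)

-- for i, c in enumerate(xs): d[i] = c
def loadFreq (xs : List Int) : PySem.Dict Int Int :=
  (PySem.List.enumerate xs 0).foldl (fun d p => d.insert p.1 p.2) PySem.Dict.empty

def reidx_eval_alt (triples : List (Int × Int × Int × Int)) (train_ent_reidx : List (Int × Int)) (train_rel_reidx : List (Int × Int)) (train_time_reidx : List (Int × Int)) : (List (Int × Int × Int × Int)) × (List (Int × Int)) × (List (Int × Int)) × (List (Int × Int)) × (List (Int × Int)) × (List (Int × Int)) × (List (Int × Int)) × List Int × List Int × List Int :=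
  let s := streamsB triples
  let entU := PySem.List.dedup s.1
  let relU := PySem.List.dedup s.2.1
  let timeU := PySem.List.dedup s.2.2
  let entD := idTable entU
  let relD := idTable relU
  let timeD := idTable timeU
  -- ent_reidx[h] etc.: every key is in its table, so getD is exact here
  let rts := triples.map (fun tri =>
    (entD.getD tri.1 0, relD.getD tri.2.1 0, entD.getD tri.2.2.1 0, timeD.getD tri.2.2.2 0))
  let cnts := tallyArrays rts (List.replicate entU.length 0) (List.replicate relU.length 0)
    (List.replicate timeU.length 0)
  let teD : PySem.Dict Int Int := PySem.Dict.mk train_ent_reidx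
  let trD : PySem.Dict Int Int := PySem.Dict.mk train_rel_reidx
  let ttD : PySem.Dict Int Int := PySem.Dict.mk train_time_reidx
  (rts, (loadFreq cnts.1).items, (loadFreq cnts.2.1).items, (loadFreq cnts.2.2).items,
   entD.items, relD.items, timeD.items,
   entU.map (fun k => teD.getD k (-1)),
   relU.map (fun k => trD.getD k (-1)),
   timeU.map (fun k => ttD.getD k (-1)))

-- ===== PRECONDITION & SPEC =====
def Spec_reidx_eval (triples : List (Int × Int × Int × Int)) (train_ent_reidx : List (Int × Int)) (train_rel_reidx : List (Int × Int)) (train_time_reidx : List (Int × Int)) (out : (List (Int × Int × Int × Int)) × (List (Int × Int)) × (List (Int × Int)) × (List (Int × Int)) × (List (Int × Int)) × (List (Int × Int)) × (List (Int × Int)) × List Int × List Int × List Int) : Prop := out = reidx_eval_alt triples train_ent_reidx train_rel_reidx train_time_reidx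
instance (triples : List (Int × Int × Int × Int)) (train_ent_reidx : List (Int × Int)) (train_rel_reidx : List (Int × Int)) (train_time_reidx : List (Int × Int)) (out : (List (Int × Int × Int × Int)) × (List (Int × Int)) × (List (Int × Int)) × (List (Int × Int)) × (List (Int × Int)) × (List (Int × Int)) × (List (Int × Int)) × List Int × List Int × List Int) : Decidable (Spec_reidx_eval triples train_ent_reidx train_rel_reidx train_time_reidx out) := by
  unfold Spec_reidx_eval
  have i3 : DecidableEq (List Int × List Int × List Int) := instDecidableEqProd
  have i4 : DecidableEq (List (Int × Int) × List Int × List Int × List Int) := instDecidableEqProd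
  have i5 : DecidableEq (List (Int × Int) × List (Int × Int) × List Int × List Int × List Int) := instDecidableEqProd
  have i6 : DecidableEq (List (Int × Int) × List (Int × Int) × List (Int × Int) × List Int × List Int × List Int) := instDecidableEqProd
  have i7 : DecidableEq (List (Int × Int) × List (Int × Int) × List (Int × Int) × List (Int × Int) × List Int × List Int × List Int) := instDecidableEqProd
  have i8 : DecidableEq (List (Int × Int) × List (Int × Int) × List (Int × Int) × List (Int × Int) × List (Int × Int) × List Int × List Int × List Int) := instDecidableEqProd
  have i9 : DecidableEq (List (Int × Int) × List (Int × Int) × List (Int × Int) × List (Int × Int) × List (Int × Int) × List (Int × Int) × List Int × List Int × List Int) := instDecidableEqProd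
  have i10 : DecidableEq (List (Int × Int × Int × Int) × List (Int × Int) × List (Int × Int) × List (Int × Int) × List (Int × Int) × List (Int × Int) × List (Int × Int) × List Int × List Int × List Int) := instDecidableEqProd
  exact i10 _ _

-- ===== CLAIM (what is proved, stated in full; the proofs are below) =====
def Claim_equal_reidx_eval : Prop := ∀ (triples : List (Int × Int × Int × Int)) (train_ent_reidx : List (Int × Int)) (train_rel_reidx : List (Int × Int)) (train_time_reidx : List (Int × Int)), Dom_reidx_eval triples train_ent_reidx train_rel_reidx train_time_reidx → Spec_reidx_eval triples train_ent_reidx train_rel_reidx train_time_reidx (reidx_eval triples train_ent_reidx train_rel_reidx train_time_reidx)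

-- ===== LEMMAS AND PROOFS =====

-- canonical online form of the re-indexing loop, used only by the proofs:
def reidxLoopB : List (Int × Int × Int × Int) → PySem.Dict Int Int → PySem.Dict Int Int → PySem.Dict Int Int → List (Int × Int × Int × Int) → (PySem.Dict Int Int) × (PySem.Dict Int Int) × (PySem.Dict Int Int) × List (Int × Int × Int × Int)
  | [], eD, rD, tD, acc => (eD, rD, tD, acc)
  | tri :: rest, eD, rD, tD, acc =>
    let h := tri.1; let r := tri.2.1; let t := tri.2.2.1; let T := tri.2.2.2
    let eD1 := if eD.contains h then eD else eD.insert h (eD.size : Int)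
    let eD2 := if eD1.contains t then eD1 else eD1.insert t (eD1.size : Int)
    let rD1 := if rD.contains r then rD else rD.insert r (rD.size : Int)
    let tD1 := if tD.contains T then tD else tD.insert T (tD.size : Int)
    reidxLoopB rest eD2 rD1 tD1 (acc ++ [(eD2.getD h 0, rD1.getD r 0, eD2.getD t 0, tD1.getD T 0)])

def reidxTally (l : List (Int × Int × Int × Int)) : (PySem.Dict Int Int) × (PySem.Dict Int Int) × (PySem.Dict Int Int) :=
  l.foldl (fun f q =>
      (((f.1.modify q.1 0 (· + 1)).modify q.2.2.1 0 (· + 1)),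
       f.2.1.modify q.2.1 0 (· + 1),
       f.2.2.modify q.2.2.2 0 (· + 1)))
    (PySem.Dict.empty, PySem.Dict.empty, PySem.Dict.empty)

def entStream (ts : List (Int × Int × Int × Int)) : List Int :=
  ts.flatMap (fun tri => [tri.1, tri.2.2.1])

-- one new re-indexed tuple extends the tally by the corresponding four bumps
theorem reidxTally_append (l : List (Int × Int × Int × Int)) (a b c d : Int) :
    reidxTally (l ++ [(a, b, c, d)]) =
      ((((reidxTally l).1.modify a 0 (· + 1)).modify c 0 (· + 1)),
       (reidxTally l).2.1.modify b 0 (· + 1),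
       (reidxTally l).2.2.modify d 0 (· + 1)) := by
  simp [reidxTally, List.foldl_append]

-- A's running counter equals the size of the dict after the conditional insert
theorem cast_size_step (d : PySem.Dict Int Int) (k v : Int) :
    (if d.contains k then (d.size : Int) else (d.size : Int) + 1) =
      (((if d.contains k then d else d.insert k v).size : Int)) := by
  by_cases h : d.contains k <;> simp [h, PySem.Dict.size_insert]

-- main loop correspondence: A's fused loop = the canonical loop plus the tally of the emitted tuples
theorem loopAB (ts : List (Int × Int × Int × Int)) :
    ∀ (eD rD tD : PySem.Dict Int Int) (acc : List (Int × Int × Int × Int)),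
    reidxLoopA ts eD rD tD (eD.size : Int) (rD.size : Int) (tD.size : Int)
        (reidxTally acc).1 (reidxTally acc).2.1 (reidxTally acc).2.2 acc =
      (let s := reidxLoopB ts eD rD tD acc
       (s.1, s.2.1, s.2.2.1,
        (reidxTally s.2.2.2).1, (reidxTally s.2.2.2).2.1, (reidxTally s.2.2.2).2.2,
        s.2.2.2)) := by
  induction ts with
  | nil => intro eD rD tD acc; simp [reidxLoopA, reidxLoopB]
  | cons tri rest ih =>
    intro eD rD tD acc
    simp only [reidxLoopA, reidxLoopB]
    rw [cast_size_step eD tri.1 ((eD.size : Int))]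
    rw [cast_size_step (if eD.contains tri.1 then eD else eD.insert tri.1 (eD.size : Int)) tri.2.2.1
      (((if eD.contains tri.1 then eD else eD.insert tri.1 (eD.size : Int)).size : Int))]
    rw [cast_size_step rD tri.2.1 ((rD.size : Int))]
    rw [cast_size_step tD tri.2.2.2 ((tD.size : Int))]
    refine Eq.trans ?_ (ih _ _ _ _)
    congr 1 <;> simp [reidxTally_append]

-- a dict is "good" when its stored ids are 0,1,…,size-1 in insertion order with distinct keys
def goodDict (d : PySem.Dict Int Int) : Prop :=
  d.items.map Prod.snd = (List.range d.size).map (fun (k : Nat) => (k : Int)) ∧ d.keys.Nodup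

theorem goodDict_empty : goodDict PySem.Dict.empty := by
  constructor <;> simp [PySem.Dict.empty, PySem.Dict.keys, PySem.Dict.size]

theorem goodDict_step (d : PySem.Dict Int Int) (k : Int) (h : goodDict d) :
    goodDict (if d.contains k then d else d.insert k (d.size : Int)) := by
  by_cases hc : d.contains k
  · simpa [hc]
  · obtain ⟨hv, hk⟩ := h
    rw [if_neg hc]
    have hb : d.contains k = false := by simpa using hc
    refine ⟨?_, PySem.Dict.nodup_keys_insert _ _ _ hk⟩
    rw [PySem.Dict.items_insert_of_not_contains _ _ hb, PySem.Dict.size_insert]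
    simp [hb, List.range_succ, hv]

theorem goodDict_loopB (ts : List (Int × Int × Int × Int)) :
    ∀ (eD rD tD : PySem.Dict Int Int) (acc : List (Int × Int × Int × Int)),
    goodDict eD → goodDict rD → goodDict tD →
    goodDict (reidxLoopB ts eD rD tD acc).1 ∧
    goodDict (reidxLoopB ts eD rD tD acc).2.1 ∧
    goodDict (reidxLoopB ts eD rD tD acc).2.2.1 := by
  induction ts with
  | nil => intro eD rD tD acc he hr ht; simpa [reidxLoopB] using ⟨he, hr, ht⟩
  | cons tri rest ih =>
    intro eD rD tD acc he hr ht
    simp only [reidxLoopB]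
    exact ih _ _ _ _ (goodDict_step _ _ (goodDict_step _ _ he)) (goodDict_step _ _ hr)
      (goodDict_step _ _ ht)

-- conditional insert: keys grow like Set.add, lookups of present keys survive
theorem condInsert_keys (d : PySem.Dict Int Int) (k v : Int) :
    (if d.contains k then d else d.insert k v).keys = PySem.Set.add d.keys k := by
  by_cases hc : d.contains k
  · rw [if_pos hc, PySem.Set.add_of_mem]
    exact (PySem.Dict.contains_iff_mem_keys d k).mp hc
  · have hb : d.contains k = false := by simpa using hc
    rw [if_neg hc, PySem.Dict.keys_insert_of_not_contains _ _ hb, PySem.Set.add_of_not_mem]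
    exact fun hm => hc ((PySem.Dict.contains_iff_mem_keys d k).mpr hm)

theorem condInsert_get? (d : PySem.Dict Int Int) (k v k' : Int) (h : d.contains k' = true) :
    (if d.contains k then d else d.insert k v).get? k' = d.get? k' := by
  by_cases hc : d.contains k
  · rw [if_pos hc]
  · rw [if_neg hc]
    refine PySem.Dict.get?_insert_of_ne _ _ ?_
    rintro rfl; exact hc h

theorem condInsert_contains (d : PySem.Dict Int Int) (k v k' : Int) (h : d.contains k' = true) :
    (if d.contains k then d else d.insert k v).contains k' = true := by
  by_cases hc : d.contains k
  · rwa [if_pos hc]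
  · rw [if_neg hc, PySem.Dict.contains_insert]; simp [h]

-- lookups of already-present keys are unchanged by the rest of the loop
theorem loopB_mono (ts : List (Int × Int × Int × Int)) :
    ∀ (eD rD tD : PySem.Dict Int Int) (acc : List (Int × Int × Int × Int)) (k : Int),
    (eD.contains k = true → (reidxLoopB ts eD rD tD acc).1.get? k = eD.get? k) ∧
    (rD.contains k = true → (reidxLoopB ts eD rD tD acc).2.1.get? k = rD.get? k) ∧
    (tD.contains k = true → (reidxLoopB ts eD rD tD acc).2.2.1.get? k = tD.get? k) := by
  induction ts with
  | nil => intro eD rD tD acc k; simp [reidxLoopB]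
  | cons tri rest ih =>
    intro eD rD tD acc k
    simp only [reidxLoopB]
    refine ⟨fun hk => ?_, fun hk => ?_, fun hk => ?_⟩
    · rw [(ih _ _ _ _ k).1 (condInsert_contains _ _ _ _ (condInsert_contains _ _ _ _ hk))]
      rw [condInsert_get? _ _ _ _ (condInsert_contains _ _ _ _ hk), condInsert_get? _ _ _ _ hk]
    · rw [(ih _ _ _ _ k).2.1 (condInsert_contains _ _ _ _ hk), condInsert_get? _ _ _ _ hk]
    · rw [(ih _ _ _ _ k).2.2 (condInsert_contains _ _ _ _ hk), condInsert_get? _ _ _ _ hk]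

theorem getD_eq_of_get?_eq (d d' : PySem.Dict Int Int) (k : Int)
    (h : d.get? k = d'.get? k) : d.getD k 0 = d'.getD k 0 := by
  rw [PySem.Dict.getD_eq_get?_getD, PySem.Dict.getD_eq_get?_getD, h]

-- the emitted tuples are the lookups in the FINAL dicts
theorem loopB_acc (ts : List (Int × Int × Int × Int)) :
    ∀ (eD rD tD : PySem.Dict Int Int) (acc : List (Int × Int × Int × Int)),
    (reidxLoopB ts eD rD tD acc).2.2.2 =
      acc ++ ts.map (fun tri =>
        ((reidxLoopB ts eD rD tD acc).1.getD tri.1 0,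
         (reidxLoopB ts eD rD tD acc).2.1.getD tri.2.1 0,
         (reidxLoopB ts eD rD tD acc).1.getD tri.2.2.1 0,
         (reidxLoopB ts eD rD tD acc).2.2.1.getD tri.2.2.2 0)) := by
  induction ts with
  | nil => intro eD rD tD acc; simp [reidxLoopB]
  | cons tri rest ih =>
    intro eD rD tD acc
    simp only [reidxLoopB, List.map_cons]
    set eD2 := (if (if eD.contains tri.1 then eD else eD.insert tri.1 (eD.size : Int)).contains tri.2.2.1
        then (if eD.contains tri.1 then eD else eD.insert tri.1 (eD.size : Int))
        else (if eD.contains tri.1 then eD else eD.insert tri.1 (eD.size : Int)).insert tri.2.2.1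
          ((if eD.contains tri.1 then eD else eD.insert tri.1 (eD.size : Int)).size : Int)) with heD2
    set rD1 := (if rD.contains tri.2.1 then rD else rD.insert tri.2.1 (rD.size : Int)) with hrD1
    set tD1 := (if tD.contains tri.2.2.2 then tD else tD.insert tri.2.2.2 (tD.size : Int)) with htD1
    have hh : eD2.contains tri.1 = true := by
      rw [heD2]
      refine condInsert_contains _ _ _ _ ?_
      by_cases hc : eD.contains tri.1
      · rw [if_pos hc]; exact hc
      · rw [if_neg hc]; exact PySem.Dict.contains_insert_self _ _ _
    have ht : eD2.contains tri.2.2.1 = true := by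
      rw [heD2]
      by_cases hc : (if eD.contains tri.1 then eD else eD.insert tri.1 (eD.size : Int)).contains tri.2.2.1
      · rw [if_pos hc]; exact hc
      · rw [if_neg hc]; exact PySem.Dict.contains_insert_self _ _ _
    have hr : rD1.contains tri.2.1 = true := by
      rw [hrD1]
      by_cases hc : rD.contains tri.2.1
      · rw [if_pos hc]; exact hc
      · rw [if_neg hc]; exact PySem.Dict.contains_insert_self _ _ _
    have hT : tD1.contains tri.2.2.2 = true := by
      rw [htD1]
      by_cases hc : tD.contains tri.2.2.2
      · rw [if_pos hc]; exact hc
      · rw [if_neg hc]; exact PySem.Dict.contains_insert_self _ _ _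
    rw [ih eD2 rD1 tD1]
    have m := loopB_mono rest eD2 rD1 tD1
      (acc ++ [(eD2.getD tri.1 0, rD1.getD tri.2.1 0, eD2.getD tri.2.2.1 0, tD1.getD tri.2.2.2 0)])
    rw [getD_eq_of_get?_eq _ _ _ ((m tri.1).1 hh),
        getD_eq_of_get?_eq _ _ _ ((m tri.2.1).2.1 hr),
        getD_eq_of_get?_eq _ _ _ ((m tri.2.2.1).1 ht),
        getD_eq_of_get?_eq _ _ _ ((m tri.2.2.2).2.2 hT)]
    simp

-- the final key lists are the ordered dedups of the key streams
theorem loopB_keys (ts : List (Int × Int × Int × Int)) :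
    ∀ (eD rD tD : PySem.Dict Int Int) (acc : List (Int × Int × Int × Int)),
    (reidxLoopB ts eD rD tD acc).1.keys = PySem.Set.update eD.keys (entStream ts) ∧
    (reidxLoopB ts eD rD tD acc).2.1.keys = PySem.Set.update rD.keys (ts.map (·.2.1)) ∧
    (reidxLoopB ts eD rD tD acc).2.2.1.keys = PySem.Set.update tD.keys (ts.map (·.2.2.2)) := by
  induction ts with
  | nil => intro eD rD tD acc; simp [reidxLoopB, entStream, PySem.Set.update_nil]
  | cons tri rest ih =>
    intro eD rD tD acc
    simp only [reidxLoopB]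
    refine ⟨?_, ?_, ?_⟩
    · rw [(ih _ _ _ _).1, condInsert_keys, condInsert_keys]
      simp [entStream, PySem.Set.update_cons]
    · rw [(ih _ _ _ _).2.1, condInsert_keys]
      simp [PySem.Set.update_cons]
    · rw [(ih _ _ _ _).2.2, condInsert_keys]
      simp [PySem.Set.update_cons]

-- reconstruct a pair list from its projections
theorem zip_proj (l : List (Int × Int)) : (l.map Prod.fst).zip (l.map Prod.snd) = l := by
  rw [List.zip_map']; simp

-- a good dict's items are its keys paired with 0,1,2,…
theorem items_of_good (d : PySem.Dict Int Int) (h : goodDict d) :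
    d.items = d.keys.zip (PySem.List.pyRange 0 (d.size : Int) 1) := by
  obtain ⟨hv, _⟩ := h
  have hr : PySem.List.pyRange 0 (d.size : Int) 1 = (List.range d.size).map (fun (k : Nat) => (k : Int)) := by
    rw [PySem.List.pyRange_one]
    simp
  rw [hr, ← hv]
  rw [show d.keys = d.items.map Prod.fst from rfl]
  exact (zip_proj d.items).symm

-- the id table of a dedup list, concretely
theorem idTable_items (u : List Int) (hu : u.Nodup) :
    (idTable u).items = (PySem.List.enumerate u 0).map (fun p => (p.2, p.1)) := by
  have hfst : ((PySem.List.enumerate u 0).map (fun p => (p.2, p.1))).map Prod.fst = u := by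
    rw [List.map_map]
    exact PySem.List.map_snd_enumerate u 0
  have hnodup : (((PySem.List.enumerate u 0).map (fun p => (p.2, p.1))).map Prod.fst).Nodup := by
    rw [hfst]; exact hu
  have := PySem.Dict.items_foldl_insert_fresh ((PySem.List.enumerate u 0).map (fun p => (p.2, p.1)))
    Prod.fst Prod.snd PySem.Dict.empty
    (fun a _ => PySem.Dict.contains_empty a.1) hnodup
  simpa [idTable, PySem.Dict.ofList] using this

theorem enumerate_swap (u : List Int) :
    (PySem.List.enumerate u 0).map (fun p => (p.2, p.1)) =
      u.zip (PySem.List.pyRange 0 (u.length : Int) 1) := by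
  have h1 : ((PySem.List.enumerate u 0).map (fun p => (p.2, p.1))).map Prod.fst = u := by
    rw [List.map_map]
    exact PySem.List.map_snd_enumerate u 0
  have h2 : ((PySem.List.enumerate u 0).map (fun p => (p.2, p.1))).map Prod.snd =
      PySem.List.pyRange 0 (u.length : Int) 1 := by
    rw [List.map_map]
    have := PySem.List.map_fst_enumerate u 0
    simpa [Function.comp_def] using this
  calc (PySem.List.enumerate u 0).map (fun p => (p.2, p.1))
      = (((PySem.List.enumerate u 0).map (fun p => (p.2, p.1))).map Prod.fst).zip
          (((PySem.List.enumerate u 0).map (fun p => (p.2, p.1))).map Prod.snd) :=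
        (zip_proj _).symm
    _ = u.zip (PySem.List.pyRange 0 (u.length : Int) 1) := by rw [h1, h2]

-- position lookup in the id table
theorem idTable_getD (u : List Int) (hu : u.Nodup) (j : Nat) (hj : j < u.length) :
    (idTable u).getD (u[j]'hj) 0 = (j : Int) := by
  have hlen : u.length = (PySem.List.pyRange 0 (u.length : Int) 1).length := by
    rw [PySem.List.length_pyRange_one]; simp
  have hmem : (u[j]'hj, (j : Int)) ∈ (idTable u).items := by
    rw [idTable_items u hu, enumerate_swap]
    have : (u.zip (PySem.List.pyRange 0 (u.length : Int) 1))[j]'(by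
        rw [List.length_zip]; omega) = (u[j]'hj, (j : Int)) := by
      rw [List.getElem_zip, PySem.List.getElem_pyRange_one]
      simp
    rw [← this]
    exact List.getElem_mem _
  have hnd : (idTable u).keys.Nodup := by
    rw [show (idTable u).keys = (idTable u).items.map Prod.fst from rfl, idTable_items u hu,
      List.map_map]
    rw [show ((fun (p : Int × Int) => p.1) ∘ fun p => (p.2, p.1)) = (fun (p : Int × Int) => p.2) from rfl]
    rw [PySem.List.map_snd_enumerate]
    exact hu
  exact PySem.Dict.getD_of_mem_items _ hmem hnd 0

theorem map_look_eq_range (u : List Int) (hu : u.Nodup) :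
    u.map (fun k => (idTable u).getD k 0) = PySem.List.pyRange 0 (u.length : Int) 1 := by
  apply List.ext_getElem
  · rw [List.length_map, PySem.List.length_pyRange_one]; simp
  · intro j h1 h2
    rw [List.getElem_map, PySem.List.getElem_pyRange_one]
    have := idTable_getD u hu j (by simpa using h1)
    simpa using this

-- the id-table lookup is injective on the dedup list
theorem look_inj (u : List Int) (hu : u.Nodup) :
    ∀ a ∈ u, ∀ b ∈ u, (idTable u).getD a 0 = (idTable u).getD b 0 → a = b := by
  intro a ha b hb hab
  obtain ⟨i, hi, rfl⟩ := List.mem_iff_getElem.mp ha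
  obtain ⟨j, hj, rfl⟩ := List.mem_iff_getElem.mp hb
  rw [idTable_getD u hu i hi, idTable_getD u hu j hj] at hab
  have : i = j := by exact_mod_cast hab
  subst this; rfl

-- ordered dedup commutes with an injective map
theorem dedup_map_inj (l : List Int) (f : Int → Int)
    (hf : ∀ a ∈ l, ∀ b ∈ l, f a = f b → a = b) :
    PySem.List.dedup (l.map f) = (PySem.List.dedup l).map f := by
  induction l using List.reverseRecOn with
  | nil => simp [PySem.List.dedup]
  | append_singleton xs x ih =>
    have hf' : ∀ a ∈ xs, ∀ b ∈ xs, f a = f b → a = b := fun a ha b hb =>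
      hf a (by simp [ha]) b (by simp [hb])
    rw [List.map_append, List.map_singleton]
    rw [PySem.List.dedup_eq_ofList, PySem.List.dedup_eq_ofList,
      PySem.Set.ofList_append_singleton, PySem.Set.ofList_append_singleton]
    rw [← PySem.List.dedup_eq_ofList, ← PySem.List.dedup_eq_ofList, ih hf']
    by_cases hx : x ∈ PySem.List.dedup xs
    · rw [PySem.Set.add_of_mem hx, PySem.Set.add_of_mem]
      exact List.mem_map_of_mem hx
    · rw [PySem.Set.add_of_not_mem hx, PySem.Set.add_of_not_mem, List.map_append,
        List.map_singleton]
      intro hm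
      obtain ⟨a, ha, hfa⟩ := List.mem_map.mp hm
      have hax : a ∈ xs := by rwa [PySem.List.mem_dedup] at ha
      have : a = x := hf a (by simp [hax]) x (by simp) hfa
      exact hx (this ▸ ha)

-- the three tally dicts of the canonical tally are counters of the id streams
theorem tally_go (l : List (Int × Int × Int × Int)) :
    ∀ (d1 d2 d3 : PySem.Dict Int Int),
    l.foldl (fun f q =>
        (((f.1.modify q.1 0 (· + 1)).modify q.2.2.1 0 (· + 1)),
         f.2.1.modify q.2.1 0 (· + 1),
         f.2.2.modify q.2.2.2 0 (· + 1))) (d1, d2, d3) =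
      ((l.flatMap (fun q => [q.1, q.2.2.1])).foldl (fun d x => d.modify x 0 (· + 1)) d1,
       (l.map (·.2.1)).foldl (fun d x => d.modify x 0 (· + 1)) d2,
       (l.map (·.2.2.2)).foldl (fun d x => d.modify x 0 (· + 1)) d3) := by
  induction l with
  | nil => intro d1 d2 d3; simp
  | cons q rest ih =>
    intro d1 d2 d3
    simp only [List.foldl_cons, List.flatMap_cons, List.map_cons, List.foldl_append]
    exact ih _ _ _

theorem reidxTally_eq_counter (l : List (Int × Int × Int × Int)) :
    reidxTally l =
      (PySem.Dict.counter (l.flatMap (fun q => [q.1, q.2.2.1])),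
       PySem.Dict.counter (l.map (·.2.1)),
       PySem.Dict.counter (l.map (·.2.2.2))) := by
  rw [PySem.Dict.counter_eq_foldl, PySem.Dict.counter_eq_foldl, PySem.Dict.counter_eq_foldl]
  exact tally_go l _ _ _

-- the tally arrays decompose the same way
theorem tallyArrays_eq (l : List (Int × Int × Int × Int)) :
    ∀ (ec rc tc : List Int),
    tallyArrays l ec rc tc =
      ((l.flatMap (fun q => [q.1, q.2.2.1])).foldl bumpAt ec,
       (l.map (·.2.1)).foldl bumpAt rc,
       (l.map (·.2.2.2)).foldl bumpAt tc) := by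
  induction l with
  | nil => intro ec rc tc; simp [tallyArrays]
  | cons q rest ih =>
    intro ec rc tc
    simp only [tallyArrays, List.foldl_cons, List.flatMap_cons, List.map_cons,
      List.foldl_append]
    exact ih _ _ _

theorem length_bumpFold (ids : List Int) : ∀ (c : List Int), (ids.foldl bumpAt c).length = c.length := by
  induction ids with
  | nil => intro c; simp
  | cons i rest ih =>
    intro c
    rw [List.foldl_cons, ih, bumpAt, PySem.List.length_pySetD]

theorem getD_bumpFold (ids : List Int) :
    ∀ (c : List Int), (∀ i ∈ ids, 0 ≤ i ∧ i < (c.length : Int)) →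
    ∀ (j : Nat), j < c.length →
    (ids.foldl bumpAt c).getD j 0 = c.getD j 0 + (ids.count ((j : Nat) : Int) : Int) := by
  induction ids with
  | nil => intro c _ j hj; simp
  | cons i rest ih =>
    intro c hb j hj
    obtain ⟨hi0, hilen⟩ := hb i (by simp)
    have hlen : (bumpAt c i).length = c.length := by rw [bumpAt, PySem.List.length_pySetD]
    have hb' : ∀ x ∈ rest, 0 ≤ x ∧ x < ((bumpAt c i).length : Int) := by
      intro x hx; rw [hlen]; exact hb x (by simp [hx])
    have hj1 : j < (bumpAt c i).length := by rw [hlen]; exact hj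
    rw [List.foldl_cons, ih (bumpAt c i) hb' j hj1]
    have hbj : (bumpAt c i).getD j 0 =
        if j = i.toNat then c.getD j 0 + 1 else c.getD j 0 := by
      rw [bumpAt]
      have hset : PySem.List.pySetD c i (PySem.List.pyGetD c i 0 + 1) =
          c.set i.toNat (PySem.List.pyGetD c i 0 + 1) :=
        PySem.List.pySetD_of_nonneg c (PySem.List.pyGetD c i 0 + 1) hi0
      rw [hset, PySem.List.pyGetD_eq_getElem c 0 hi0 hilen]
      rw [List.getD_eq_getElem _ _ (by rw [List.length_set]; exact hj)]
      rw [List.getElem_set]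
      by_cases hji : i.toNat = j
      · rw [if_pos hji, if_pos hji.symm, List.getD_eq_getElem _ _ hj]
        subst hji
        rfl
      · rw [if_neg hji, if_neg (fun h => hji h.symm), List.getD_eq_getElem _ _ hj]
    have hcnt : List.count ((j : Nat) : Int) (i :: rest) =
        List.count ((j : Nat) : Int) rest + (if j = i.toNat then 1 else 0) := by
      rw [List.count_cons]
      by_cases hji : j = i.toNat
      · have hbq : (i == ((j : Nat) : Int)) = true := by rw [beq_iff_eq]; omega
        rw [hbq, if_pos hji]
        simp
      · have hbq : (i == ((j : Nat) : Int)) = false := by rw [beq_eq_false_iff_ne]; omega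
        rw [hbq, if_neg hji]
        simp
    rw [hbj, hcnt]
    by_cases hji : j = i.toNat
    · rw [if_pos hji, if_pos hji]
      push_cast
      ring
    · rw [if_neg hji, if_neg hji]
      simp

theorem zip_self_map (l : List Int) (g : Int → Int) :
    l.zip (l.map g) = l.map (fun k => (k, g k)) := by
  induction l with
  | nil => simp
  | cons x xs ih => simp [ih]

-- enumerate of an array whose entries are given by g on the index
theorem enumerate_eq_map_range (xs : List Int) (n : Nat) (g : Int → Int)
    (hn : xs.length = n)
    (h : ∀ (j : Nat) (hj : j < xs.length), xs[j]'hj = g ((j : Nat) : Int)) :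
    PySem.List.enumerate xs 0 =
      (PySem.List.pyRange 0 (n : Int) 1).map (fun k => (k, g k)) := by
  have hx : (PySem.List.pyRange 0 (n : Int) 1).map g = xs := by
    apply List.ext_getElem
    · rw [List.length_map, PySem.List.length_pyRange_one]; omega
    · intro j h1 h2
      rw [List.getElem_map, PySem.List.getElem_pyRange_one, h j h2]
      norm_num
  have h1 : (PySem.List.enumerate xs 0).map Prod.fst = PySem.List.pyRange 0 (n : Int) 1 := by
    rw [PySem.List.map_fst_enumerate, hn]; simp
  have h2 : (PySem.List.enumerate xs 0).map Prod.snd = xs := PySem.List.map_snd_enumerate xs 0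
  calc PySem.List.enumerate xs 0
      = ((PySem.List.enumerate xs 0).map Prod.fst).zip ((PySem.List.enumerate xs 0).map Prod.snd) :=
        (zip_proj _).symm
    _ = (PySem.List.pyRange 0 (n : Int) 1).zip ((PySem.List.pyRange 0 (n : Int) 1).map g) := by
        rw [h1, h2, hx]
    _ = (PySem.List.pyRange 0 (n : Int) 1).map (fun k => (k, g k)) := zip_self_map _ g

-- loading an array into a fresh dict gives exactly its enumeration
theorem loadFreq_items (xs : List Int) : (loadFreq xs).items = PySem.List.enumerate xs 0 := by
  have hfst : (PySem.List.enumerate xs 0).map Prod.fst = PySem.List.pyRange 0 (xs.length : Int) 1 := by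
    rw [PySem.List.map_fst_enumerate]; simp
  have hnodup : ((PySem.List.enumerate xs 0).map Prod.fst).Nodup := by
    rw [hfst]; exact PySem.List.nodup_pyRange_one _ _
  have := PySem.Dict.items_foldl_insert_fresh (PySem.List.enumerate xs 0)
    Prod.fst Prod.snd PySem.Dict.empty
    (fun a _ => PySem.Dict.contains_empty a.1) hnodup
  simpa [loadFreq] using this

-- A's guarded train lookup is B's lookup with default -1
theorem train_lookup_eq (tr : List (Int × Int)) (k : Int) :
    (if (PySem.Dict.mk tr).contains k then (PySem.Dict.mk tr).getD k 0 else -1) =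
      (PySem.Dict.mk tr).getD k (-1) := by
  rcases hg : (PySem.Dict.mk tr).get? k with _ | v
  · rw [PySem.Dict.contains_eq_isSome_get?, hg]
    simp [PySem.Dict.getD_eq_get?_getD, hg]
  · rw [PySem.Dict.contains_eq_isSome_get?, hg]
    simp [PySem.Dict.getD_of_get?_eq_some _ _ hg]

-- A's inverse-dict + range indexing collapses to a map over the keys in insertion order
theorem mapList_eq (d : PySem.Dict Int Int) (hd : goodDict d) (g : Int → Int) :
    (PySem.List.pyRange 0 (d.size : Int) 1).map (fun i =>
        g ((PySem.Dict.ofList (d.items.map (fun p => (p.2, p.1)))).getD i 0)) =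
      d.keys.map g := by
  obtain ⟨hv, hk⟩ := hd
  have hsize : d.size = d.items.length := rfl
  have hswapfst : (d.items.map (fun p => (p.2, p.1))).map Prod.fst = d.items.map Prod.snd := by
    simp [List.map_map]
  have hrange : ((List.range d.size).map (fun (k : Nat) => (k : Int))).Nodup :=
    List.Nodup.map (fun a b h => by exact_mod_cast h) List.nodup_range
  have hnodup : ((d.items.map (fun p => (p.2, p.1))).map Prod.fst).Nodup := by
    rw [hswapfst, hv]; exact hrange
  have hitems : (PySem.Dict.ofList (d.items.map (fun p => (p.2, p.1)))).items
      = d.items.map (fun p => (p.2, p.1)) := by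
    have := PySem.Dict.items_foldl_insert_fresh (d.items.map (fun p => (p.2, p.1)))
      Prod.fst Prod.snd PySem.Dict.empty
      (fun a _ => PySem.Dict.contains_empty a.1) hnodup
    simpa [PySem.Dict.ofList] using this
  have hkinv : (PySem.Dict.ofList (d.items.map (fun p => (p.2, p.1)))).keys.Nodup := by
    rw [show (PySem.Dict.ofList (d.items.map (fun p => (p.2, p.1)))).keys
        = ((PySem.Dict.ofList (d.items.map (fun p => (p.2, p.1)))).items).map Prod.fst from rfl,
      hitems]
    exact hnodup
  have hget : ∀ (j : Nat) (hj : j < d.items.length),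
      (PySem.Dict.ofList (d.items.map (fun p => (p.2, p.1)))).getD (j : Int) 0 = (d.items[j]'hj).1 := by
    intro j hj
    have hsnd : (d.items[j]'hj).2 = (j : Int) := by
      have h1 : (d.items.map Prod.snd)[j]'(by simpa using hj)
          = ((List.range d.size).map (fun (k : Nat) => (k : Int)))[j]'(by rw [← hv]; simpa using hj) := by
        exact List.getElem_of_eq hv _
      simpa [hsize] using h1
    have hmem : ((j : Int), (d.items[j]'hj).1) ∈
        (PySem.Dict.ofList (d.items.map (fun p => (p.2, p.1)))).items := by
      rw [hitems]
      have h2 : ((d.items[j]'hj).2, (d.items[j]'hj).1) ∈ d.items.map (fun p => (p.2, p.1)) :=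
        List.mem_map_of_mem (List.getElem_mem hj)
      rwa [hsnd] at h2
    exact PySem.Dict.getD_of_get?_eq_some _ _
      (PySem.Dict.get?_of_mem_items _ hmem hkinv)
  rw [PySem.List.pyRange_zero_natCast, List.map_map]
  apply List.ext_getElem
  · rw [show d.keys = d.items.map Prod.fst from rfl]
    simpa using hsize.symm
  · intro i h1 h2
    have hi : i < d.items.length := by simpa using h1
    simp only [List.getElem_map, List.getElem_range, Function.comp]
    simp only [show d.keys = d.items.map Prod.fst from rfl, List.getElem_map]
    exact congrArg g (hget i hi)

-- the key streams, via the staged fold of port B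
theorem streamsB_go (ts : List (Int × Int × Int × Int)) :
    ∀ (a b c : List Int),
    ts.foldl (fun s tri =>
      (s.1 ++ [tri.1, tri.2.2.1], s.2.1 ++ [tri.2.1], s.2.2 ++ [tri.2.2.2])) (a, b, c) =
      (a ++ entStream ts, b ++ ts.map (·.2.1), c ++ ts.map (·.2.2.2)) := by
  induction ts with
  | nil => intro a b c; simp [entStream]
  | cons tri rest ih =>
    intro a b c
    rw [List.foldl_cons, ih]
    simp [entStream]

theorem streamsB_eq (ts : List (Int × Int × Int × Int)) :
    streamsB ts = (entStream ts, ts.map (·.2.1), ts.map (·.2.2.2)) := by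
  rw [streamsB, streamsB_go]
  simp

-- the entity-id stream of the re-indexed triples is the looked-up key stream
theorem flatPair_spec (l : List (Int × Int × Int × Int)) (dE dR dT : PySem.Dict Int Int) :
    (l.map (fun tri => (dE.getD tri.1 0, dR.getD tri.2.1 0, dE.getD tri.2.2.1 0, dT.getD tri.2.2.2 0))).flatMap
        (fun q => [q.1, q.2.2.1]) =
      (entStream l).map (fun k => dE.getD k 0) := by
  induction l with
  | nil => simp [entStream]
  | cons tri rest ih => simp [entStream] at ih ⊢; simp [ih]

theorem mapRel_spec (l : List (Int × Int × Int × Int)) (dE dR dT : PySem.Dict Int Int) :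
    (l.map (fun tri => (dE.getD tri.1 0, dR.getD tri.2.1 0, dE.getD tri.2.2.1 0, dT.getD tri.2.2.2 0))).map
        (·.2.1) =
      (l.map (·.2.1)).map (fun k => dR.getD k 0) := by
  simp [List.map_map]

theorem mapTime_spec (l : List (Int × Int × Int × Int)) (dE dR dT : PySem.Dict Int Int) :
    (l.map (fun tri => (dE.getD tri.1 0, dR.getD tri.2.1 0, dE.getD tri.2.2.1 0, dT.getD tri.2.2.2 0))).map
        (·.2.2.2) =
      (l.map (·.2.2.2)).map (fun k => dT.getD k 0) := by
  simp [List.map_map]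

-- the whole frequency story for one key stream: dict tally = array tally, as item lists
theorem freq_items_eq (stream : List Int) :
    (PySem.Dict.counter (stream.map (fun k => (idTable (PySem.List.dedup stream)).getD k 0))).items =
      (loadFreq ((stream.map (fun k => (idTable (PySem.List.dedup stream)).getD k 0)).foldl bumpAt
        (List.replicate (PySem.List.dedup stream).length 0))).items := by
  have hnd : (PySem.List.dedup stream).Nodup := PySem.List.nodup_dedup stream
  have hinj : ∀ a ∈ stream, ∀ b ∈ stream,
      (idTable (PySem.List.dedup stream)).getD a 0 = (idTable (PySem.List.dedup stream)).getD b 0 → a = b := by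
    intro a ha b hb hab
    refine look_inj (PySem.List.dedup stream) hnd a ?_ b ?_ hab
    · rw [PySem.List.mem_dedup]; exact ha
    · rw [PySem.List.mem_dedup]; exact hb
  have hdm : PySem.List.dedup (stream.map (fun k => (idTable (PySem.List.dedup stream)).getD k 0)) =
      PySem.List.pyRange 0 ((PySem.List.dedup stream).length : Int) 1 := by
    rw [dedup_map_inj stream _ hinj, map_look_eq_range _ hnd]
  have hbounds : ∀ i ∈ stream.map (fun k => (idTable (PySem.List.dedup stream)).getD k 0),
      0 ≤ i ∧ i < ((List.replicate (PySem.List.dedup stream).length (0 : Int)).length : Int) := by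
    intro i hi
    obtain ⟨k, hk, rfl⟩ := List.mem_map.mp hi
    have hku : k ∈ PySem.List.dedup stream := by rw [PySem.List.mem_dedup]; exact hk
    have hmem : (idTable (PySem.List.dedup stream)).getD k 0 ∈
        PySem.List.pyRange 0 ((PySem.List.dedup stream).length : Int) 1 := by
      rw [← map_look_eq_range _ hnd]
      exact List.mem_map_of_mem hku
    rw [PySem.List.mem_pyRange_one] at hmem
    simpa using hmem
  have hlen : ((stream.map (fun k => (idTable (PySem.List.dedup stream)).getD k 0)).foldl bumpAt
      (List.replicate (PySem.List.dedup stream).length 0)).length = (PySem.List.dedup stream).length := by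
    rw [length_bumpFold, List.length_replicate]
  have hc : ∀ (j : Nat) (hj : j < ((stream.map (fun k => (idTable (PySem.List.dedup stream)).getD k 0)).foldl
      bumpAt (List.replicate (PySem.List.dedup stream).length 0)).length),
      ((stream.map (fun k => (idTable (PySem.List.dedup stream)).getD k 0)).foldl bumpAt
        (List.replicate (PySem.List.dedup stream).length 0))[j]'hj =
      (((stream.map (fun k => (idTable (PySem.List.dedup stream)).getD k 0)).count ((j : Nat) : Int) : Nat) : Int) := by
    intro j hj
    have hj' : j < (List.replicate (PySem.List.dedup stream).length (0 : Int)).length := by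
      rw [List.length_replicate]
      rw [hlen] at hj
      exact hj
    rw [← List.getD_eq_getElem _ 0 hj]
    rw [getD_bumpFold _ _ hbounds j hj']
    rw [List.getD_eq_getElem _ 0 hj']
    simp
  rw [PySem.Dict.items_counter, ← PySem.List.dedup_eq_ofList, hdm, loadFreq_items,
    enumerate_eq_map_range _ (PySem.List.dedup stream).length
      (fun k => ((stream.map (fun k => (idTable (PySem.List.dedup stream)).getD k 0)).count k : Int))
      hlen hc]

-- ===== VERDICT (by name: the statement is the Claim_ definition above) =====
set_option maxHeartbeats 2000000 in
theorem reidx_eval_spec : Claim_equal_reidx_eval := by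
  unfold Claim_equal_reidx_eval
  intro triples te tr tt _
  unfold Spec_reidx_eval reidx_eval reidx_eval_alt
  have h0 : (PySem.Dict.empty : PySem.Dict Int Int).size = 0 := rfl
  have hloop := loopAB triples PySem.Dict.empty PySem.Dict.empty PySem.Dict.empty []
  have htally0 : reidxTally [] = (PySem.Dict.empty, PySem.Dict.empty, PySem.Dict.empty) := rfl
  rw [htally0] at hloop
  simp only [h0, Nat.cast_zero] at hloop
  simp only [hloop, streamsB_eq]
  obtain ⟨hgE, hgR, hgT⟩ := goodDict_loopB triples PySem.Dict.empty PySem.Dict.empty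
    PySem.Dict.empty [] goodDict_empty goodDict_empty goodDict_empty
  obtain ⟨hk1, hk2, hk3⟩ := loopB_keys triples PySem.Dict.empty PySem.Dict.empty PySem.Dict.empty []
  set E := (reidxLoopB triples PySem.Dict.empty PySem.Dict.empty PySem.Dict.empty []).1 with hE
  set R := (reidxLoopB triples PySem.Dict.empty PySem.Dict.empty PySem.Dict.empty []).2.1 with hR
  set T := (reidxLoopB triples PySem.Dict.empty PySem.Dict.empty PySem.Dict.empty []).2.2.1 with hT
  set A := (reidxLoopB triples PySem.Dict.empty PySem.Dict.empty PySem.Dict.empty []).2.2.2 with hA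
  have hkE : E.keys = PySem.List.dedup (entStream triples) := by
    rw [hk1, PySem.Dict.keys_empty, PySem.Set.update_nil_left, PySem.List.dedup_eq_ofList]
  have hkR : R.keys = PySem.List.dedup (triples.map (·.2.1)) := by
    rw [hk2, PySem.Dict.keys_empty, PySem.Set.update_nil_left, PySem.List.dedup_eq_ofList]
  have hkT : T.keys = PySem.List.dedup (triples.map (·.2.2.2)) := by
    rw [hk3, PySem.Dict.keys_empty, PySem.Set.update_nil_left, PySem.List.dedup_eq_ofList]
  have hndE : (PySem.List.dedup (entStream triples)).Nodup := PySem.List.nodup_dedup _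
  have hndR : (PySem.List.dedup (triples.map (·.2.1))).Nodup := PySem.List.nodup_dedup _
  have hndT : (PySem.List.dedup (triples.map (·.2.2.2))).Nodup := PySem.List.nodup_dedup _
  have hszE : (E.size : Int) = ((PySem.List.dedup (entStream triples)).length : Int) := by
    have h1 : E.size = E.keys.length := by simp [PySem.Dict.size, PySem.Dict.keys]
    rw [h1, hkE]
  have hszR : (R.size : Int) = ((PySem.List.dedup (triples.map (·.2.1))).length : Int) := by
    have h1 : R.size = R.keys.length := by simp [PySem.Dict.size, PySem.Dict.keys]
    rw [h1, hkR]
  have hszT : (T.size : Int) = ((PySem.List.dedup (triples.map (·.2.2.2))).length : Int) := by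
    have h1 : T.size = T.keys.length := by simp [PySem.Dict.size, PySem.Dict.keys]
    rw [h1, hkT]
  have hED : E = idTable (PySem.List.dedup (entStream triples)) := by
    apply PySem.Dict.ext
    rw [items_of_good E hgE, idTable_items _ hndE, enumerate_swap, hkE, hszE]
  have hRD : R = idTable (PySem.List.dedup (triples.map (·.2.1))) := by
    apply PySem.Dict.ext
    rw [items_of_good R hgR, idTable_items _ hndR, enumerate_swap, hkR, hszR]
  have hTD : T = idTable (PySem.List.dedup (triples.map (·.2.2.2))) := by
    apply PySem.Dict.ext
    rw [items_of_good T hgT, idTable_items _ hndT, enumerate_swap, hkT, hszT]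
  have hacc := loopB_acc triples PySem.Dict.empty PySem.Dict.empty PySem.Dict.empty []
  rw [List.nil_append] at hacc
  rw [← hE, ← hR, ← hT, ← hA] at hacc
  rw [hED, hRD, hTD] at hacc
  simp only [Prod.mk.injEq]
  refine ⟨hacc, ?_, ?_, ?_, congrArg PySem.Dict.items hED, congrArg PySem.Dict.items hRD,
    congrArg PySem.Dict.items hTD, ?_, ?_, ?_⟩
  · rw [hacc, reidxTally_eq_counter, tallyArrays_eq, flatPair_spec]
    exact freq_items_eq (entStream triples)
  · rw [hacc, reidxTally_eq_counter, tallyArrays_eq, mapRel_spec]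
    exact freq_items_eq (triples.map (·.2.1))
  · rw [hacc, reidxTally_eq_counter, tallyArrays_eq, mapTime_spec]
    exact freq_items_eq (triples.map (·.2.2.2))
  · calc (PySem.List.pyRange 0 (E.size : Int) 1).map (fun i =>
          let k := (PySem.Dict.ofList (E.items.map (fun p => (p.2, p.1)))).getD i 0
          if (PySem.Dict.mk te).contains k then (PySem.Dict.mk te).getD k 0 else -1)
        = E.keys.map (fun k => if (PySem.Dict.mk te).contains k then (PySem.Dict.mk te).getD k 0 else -1) :=
          mapList_eq E hgE (fun k => if (PySem.Dict.mk te).contains k then (PySem.Dict.mk te).getD k 0 else -1)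
      _ = (PySem.List.dedup (entStream triples)).map
            (fun k => if (PySem.Dict.mk te).contains k then (PySem.Dict.mk te).getD k 0 else -1) := by
          rw [hkE]
      _ = (PySem.List.dedup (entStream triples)).map (fun k => (PySem.Dict.mk te).getD k (-1)) :=
          List.map_congr_left (fun k _ => train_lookup_eq te k)
  · calc (PySem.List.pyRange 0 (R.size : Int) 1).map (fun i =>
          let k := (PySem.Dict.ofList (R.items.map (fun p => (p.2, p.1)))).getD i 0
          if (PySem.Dict.mk tr).contains k then (PySem.Dict.mk tr).getD k 0 else -1)
        = R.keys.map (fun k => if (PySem.Dict.mk tr).contains k then (PySem.Dict.mk tr).getD k 0 else -1) :=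
          mapList_eq R hgR (fun k => if (PySem.Dict.mk tr).contains k then (PySem.Dict.mk tr).getD k 0 else -1)
      _ = (PySem.List.dedup (triples.map (·.2.1))).map
            (fun k => if (PySem.Dict.mk tr).contains k then (PySem.Dict.mk tr).getD k 0 else -1) := by
          rw [hkR]
      _ = (PySem.List.dedup (triples.map (·.2.1))).map (fun k => (PySem.Dict.mk tr).getD k (-1)) :=
          List.map_congr_left (fun k _ => train_lookup_eq tr k)
  · calc (PySem.List.pyRange 0 (T.size : Int) 1).map (fun i =>
          let k := (PySem.Dict.ofList (T.items.map (fun p => (p.2, p.1)))).getD i 0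
          if (PySem.Dict.mk tt).contains k then (PySem.Dict.mk tt).getD k 0 else -1)
        = T.keys.map (fun k => if (PySem.Dict.mk tt).contains k then (PySem.Dict.mk tt).getD k 0 else -1) :=
          mapList_eq T hgT (fun k => if (PySem.Dict.mk tt).contains k then (PySem.Dict.mk tt).getD k 0 else -1)
      _ = (PySem.List.dedup (triples.map (·.2.2.2))).map
            (fun k => if (PySem.Dict.mk tt).contains k then (PySem.Dict.mk tt).getD k 0 else -1) := by
          rw [hkT]
      _ = (PySem.List.dedup (triples.map (·.2.2.2))).map (fun k => (PySem.Dict.mk tt).getD k (-1)) :=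
          List.map_congr_left (fun k _ => train_lookup_eq tt k)
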